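-- pv_equiv track=rewrite | github.com/QuangPhung15/CompetitiveProgramming | codeforce/Python/800/Balanced Array.py | solve
-- ===== SOURCE A (Python) =====
-- def solve(n):
-- 	res = []
-- 	odd, even = 0, 0
--
-- 	if (n % 4 != 0):
-- 		return "NO", res
--
-- 	for i in range(2, n + 1, 2):
-- 		res.append(i)
-- 		even += i
--
-- 	for i in range(1, n - 2, 2):
-- 		res.append(i)
-- 		odd += i
--
-- 	res.append(even - odd)
-- 	return "YES", res
-- ===== SOURCE B (Python) =====
-- def solve(n):
--     if n % 4 != 0:
--         return "NO", []
--     m = n // 2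
--
--     def elem(i):
--         if i < m:
--             return 2 * i + 2
--         if i < n - 1:
--             return 2 * (i - m) + 1
--         return 3 * m - 1
--
--     return "YES", [elem(i) for i in range(n)]
-- ===== Notes on version B (the rewrite author's own statement) =====
-- stated objective: alternative
-- what changed: B computes the answer as a single comprehension over positions 0..n-1 with a per-index closed-form element (2i+2 for the first half, 2(i-m)+1 for the next, 3m-1 last), replacing A's two staged appending loops with running even/odd sum accumulators and a final sum-difference element.
-- intended difference: For n <= 0 with n % 4 == 0 (e.g. 0, -4), A's loops run zero times and its leftover accumulators make it return ('YES', [0]); B's comprehension over range(n) is empty so it returns ('YES', []), the intended value since an array of non-positive length has no elements. — e.g. on solve(0): A returns ("YES", [0]), B returns ("YES", [])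
import Mathlib
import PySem

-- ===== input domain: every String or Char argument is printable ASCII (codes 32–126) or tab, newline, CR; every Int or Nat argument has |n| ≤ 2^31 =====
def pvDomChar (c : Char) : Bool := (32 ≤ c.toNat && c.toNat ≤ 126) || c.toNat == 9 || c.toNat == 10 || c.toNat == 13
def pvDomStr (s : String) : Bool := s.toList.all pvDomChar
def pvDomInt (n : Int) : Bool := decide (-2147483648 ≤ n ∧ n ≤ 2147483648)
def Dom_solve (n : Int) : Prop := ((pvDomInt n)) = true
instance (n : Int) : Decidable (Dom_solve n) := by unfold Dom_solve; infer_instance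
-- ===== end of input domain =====

-- B replaces A's two staged appending loops with running even/odd sum accumulators by one
-- comprehension over positions 0..n-1 with a per-index closed-form element (objective:
-- alternative); on n ≤ 0 with n % 4 == 0 B returns ("YES", []) where A returns ("YES", [0]) — see D_solve.

-- ===== PORT A =====
def solve (n : Int) : String × List Int :=
  if PySem.Int.mod n 4 ≠ 0 then ("NO", [])
  else
    -- for i in range(2, n+1, 2): res.append(i); even += i
    let s1 := (PySem.List.pyRange 2 (n + 1) 2).foldl
      (fun (st : List Int × Int) i => (st.1 ++ [i], st.2 + i)) ([], 0)
    -- for i in range(1, n-2, 2): res.append(i); odd += i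
    let s2 := (PySem.List.pyRange 1 (n - 2) 2).foldl
      (fun (st : List Int × Int) i => (st.1 ++ [i], st.2 + i)) (s1.1, 0)
    ("YES", s2.1 ++ [s1.2 - s2.2])

-- ===== PORT B =====
def solve_alt (n : Int) : String × List Int :=
  if PySem.Int.mod n 4 ≠ 0 then ("NO", [])
  else
    let m := PySem.Int.floordiv n 2
    let elem : Int → Int := fun i =>
      if i < m then 2 * i + 2
      else if i < n - 1 then 2 * (i - m) + 1
      else 3 * m - 1
    ("YES", (PySem.List.pyRange 0 n 1).map elem)

-- ===== PRECONDITION & SPEC =====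
-- For n ≤ 0 with n % 4 == 0, A's loops run zero times and its leftover accumulators make it
-- return ("YES", [0]); B's comprehension over range(n) is empty, so it returns ("YES", []),
-- the intended value since an array of non-positive length has no elements.
def D_solve (n : Int) : Prop := n ≤ 0 ∧ PySem.Int.mod n 4 = 0
instance (n : Int) : Decidable (D_solve n) := by unfold D_solve; infer_instance
def Spec_solve (n : Int) (out : String × List Int) : Prop := ¬ D_solve n → out = solve_alt n
instance (n : Int) (out : String × List Int) : Decidable (Spec_solve n out) := by unfold Spec_solve; infer_instance
def pvDiffWitness_solve : Int := 0
def pvDiffWitnessOut_solve : (String × List Int) × (String × List Int) :=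
  (("YES", [0]), ("YES", []))

-- ===== CLAIM (what is proved, stated in full; the proofs are below) =====
def Claim_unchanged_solve : Prop := ∀ (n : Int), Dom_solve n → Spec_solve n (solve n)
def Claim_changed_solve : Prop := Dom_solve (pvDiffWitness_solve) ∧ D_solve (pvDiffWitness_solve) ∧ solve (pvDiffWitness_solve) = pvDiffWitnessOut_solve.1 ∧ solve_alt (pvDiffWitness_solve) = pvDiffWitnessOut_solve.2 ∧ pvDiffWitnessOut_solve.1 ≠ pvDiffWitnessOut_solve.2
def Claim_exact_solve : Prop := ∀ (n : Int), Dom_solve n → D_solve n → solve n ≠ solve_alt n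

-- ===== LEMMAS AND PROOFS =====

-- A's append-and-sum loop, characterised: it extends the accumulator list by the whole
-- iterated list and adds its sum to the running total.
theorem foldl_append_sum (l : List Int) (a : List Int) (s : Int) :
    l.foldl (fun (st : List Int × Int) i => (st.1 ++ [i], st.2 + i)) (a, s)
      = (a ++ l, s + l.sum) := by
  induction l generalizing a s with
  | nil => simp
  | cons x xs ih => simp [List.foldl, ih]; ring

theorem two_mul_sum_range_linear (a s : Int) (K : Nat) :
    2 * (((List.range K).map (fun k : Nat => a + s * (k : Int))).sum)
      = (K : Int) * (2 * a + s * ((K : Int) - 1)) := by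
  induction K with
  | zero => simp
  | succ K ih =>
    rw [List.range_succ, List.map_append, List.sum_append]
    simp only [List.map_cons, List.map_nil, List.sum_cons, List.sum_nil, add_zero]
    push_cast
    push_cast at ih
    ring_nf
    ring_nf at ih
    linarith [ih]

-- ===== VERDICT (by name: the statement is the Claim_ definition above) =====
theorem solve_spec : Claim_unchanged_solve := by
  intro n _ hnd
  unfold solve solve_alt
  by_cases hm : PySem.Int.mod n 4 = 0
  · have hpos : 0 < n := by
      rcases lt_or_ge 0 n with h | h
      · exact h
      · exact absurd ⟨h, hm⟩ hnd
    have hdvd : (4 : Int) ∣ n := (PySem.Int.mod_eq_zero_iff_dvd n 4).mp hm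
    obtain ⟨t, ht⟩ := hdvd
    obtain ⟨k, hk⟩ : ∃ k : Nat, n = 4 * ((k : Int) + 1) := by
      refine ⟨(t - 1).toNat, ?_⟩
      have ht1 : 1 ≤ t := by nlinarith
      omega
    simp only [hm, not_true, ne_eq, not_false_iff, if_neg]
    rw [foldl_append_sum, foldl_append_sum]
    simp only [List.nil_append]
    refine Prod.ext rfl ?_
    have hfd : PySem.Int.floordiv n 2 = 2 * (k : Int) + 2 := by
      have h := Int.fdiv_eq_ediv (a := n) (b := 2)
      rw [if_pos (Or.inl (by norm_num))] at h
      show Int.fdiv n 2 = 2 * (k : Int) + 2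
      omega
    -- closed forms of the three ranges involved
    have h1 : PySem.List.pyRange 2 (n + 1) 2
        = (List.range (2 * k + 2)).map (fun j : Nat => 2 + 2 * (j : Int)) := by
      have hc1 : ((n + 1 - 2 + 2 - 1) / 2).toNat = 2 * k + 2 := by omega
      rw [PySem.List.pyRange_of_pos _ _ (by norm_num),
        if_pos (show (2:Int) < n + 1 by omega), hc1]
    have h2 : PySem.List.pyRange 1 (n - 2) 2
        = (List.range (2 * k + 1)).map (fun j : Nat => 1 + 2 * (j : Int)) := by
      have hc2 : ((n - 2 - 1 + 2 - 1) / 2).toNat = 2 * k + 1 := by omega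
      rw [PySem.List.pyRange_of_pos _ _ (by norm_num),
        if_pos (show (1:Int) < n - 2 by omega), hc2]
    -- B's index range split at m and n-1
    have hsplit : PySem.List.pyRange 0 n 1
        = PySem.List.pyRange 0 (2 * (k : Int) + 2) 1
          ++ PySem.List.pyRange (2 * (k : Int) + 2) (n - 1) 1
          ++ PySem.List.pyRange (n - 1) n 1 := by
      rw [PySem.List.pyRange_one_append 0 (2 * (k : Int) + 2) n (by omega) (by omega),
        PySem.List.pyRange_one_append (2 * (k : Int) + 2) (n - 1) n (by omega) (by omega),
        List.append_assoc]
    rw [hfd, hsplit, List.map_append, List.map_append]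
    have hr0 : PySem.List.pyRange 0 (2 * (k : Int) + 2) 1
        = (List.range (2 * k + 2)).map (fun j : Nat => (j : Int)) := by
      rw [PySem.List.pyRange_one]
      have : ((2 * (k : Int) + 2) - 0).toNat = 2 * k + 2 := by omega
      rw [this]; simp
    have hr1 : PySem.List.pyRange (2 * (k : Int) + 2) (n - 1) 1
        = (List.range (2 * k + 1)).map (fun j : Nat => 2 * (k : Int) + 2 + (j : Int)) := by
      rw [PySem.List.pyRange_one]
      have : ((n - 1) - (2 * (k : Int) + 2)).toNat = 2 * k + 1 := by omega
      rw [this]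
    have hr2 : PySem.List.pyRange (n - 1) n 1 = [n - 1] := by
      have := PySem.List.pyRange_one_singleton (a := n - 1)
      rw [show (n - 1) + 1 = n by ring] at this
      exact this
    rw [hr0, hr1, hr2, List.map_map, List.map_map]
    -- evaluate the piecewise element on each segment
    have hseg0 : (List.range (2 * k + 2)).map
          ((fun i : Int => if i < 2 * (k : Int) + 2 then 2 * i + 2
            else if i < n - 1 then 2 * (i - (2 * (k : Int) + 2)) + 1
            else 3 * (2 * (k : Int) + 2) - 1) ∘ (fun j : Nat => (j : Int)))
        = (List.range (2 * k + 2)).map (fun j : Nat => 2 + 2 * (j : Int)) := by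
      apply List.map_congr_left
      intro j hj
      have hj' : j < 2 * k + 2 := List.mem_range.mp hj
      simp only [Function.comp]
      rw [if_pos (by omega)]; ring
    have hseg1 : (List.range (2 * k + 1)).map
          ((fun i : Int => if i < 2 * (k : Int) + 2 then 2 * i + 2
            else if i < n - 1 then 2 * (i - (2 * (k : Int) + 2)) + 1
            else 3 * (2 * (k : Int) + 2) - 1) ∘ (fun j : Nat => 2 * (k : Int) + 2 + (j : Int)))
        = (List.range (2 * k + 1)).map (fun j : Nat => 1 + 2 * (j : Int)) := by
      apply List.map_congr_left
      intro j hj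
      have hj' : j < 2 * k + 1 := List.mem_range.mp hj
      simp only [Function.comp]
      rw [if_neg (by omega), if_pos (by omega)]; ring
    rw [h1, h2]
    simp only [List.map_cons, List.map_nil]
    rw [hseg0, hseg1,
      if_neg (show ¬ (n - 1 < 2 * (k : Int) + 2) by omega),
      if_neg (show ¬ (n - 1 < n - 1) by omega)]
    simp only [List.append_assoc, List.append_cancel_left_eq, List.cons.injEq, and_true]
    -- the final element: even sum minus odd sum equals 3m-1
    have he := two_mul_sum_range_linear 2 2 (2 * k + 2)
    have ho := two_mul_sum_range_linear 1 2 (2 * k + 1)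
    push_cast at he ho ⊢
    nlinarith [he, ho]
  · rw [if_pos hm, if_pos hm]

theorem solve_changed : Claim_changed_solve := by unfold Claim_changed_solve; decide

theorem solve_tight : Claim_exact_solve := by
  intro n _ hD
  obtain ⟨hle, hm⟩ := hD
  unfold solve solve_alt
  simp only [hm, ne_eq, not_true, if_neg, not_false_iff]
  intro h
  have h2 := congrArg Prod.snd h
  simp only at h2
  rw [foldl_append_sum, foldl_append_sum] at h2
  have hr : PySem.List.pyRange 0 n 1 = [] := PySem.List.pyRange_one_eq_nil (by omega)
  rw [hr] at h2
  simp at h2
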